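-- pv_equiv track=rewrite | github.com/VerstraeteBert/algos-ds | test/vraag4/src/yahtzee/188.py | is_grote_straat
-- ===== SOURCE A (Python) =====
-- def is_grote_straat(lijst):
--     lijst.sort()
--     grote_straat = True
--     for i in range(1,len(lijst)):
--         onderzoek = lijst[i]
--         if onderzoek == lijst[i-1]+1:
--             continue
--         else:
--             grote_straat = False
--             break
--     return grote_straat
-- ===== SOURCE B (Python) =====
-- def is_grote_straat(lijst):
--     lijst.sort()
--     if len(lijst) < 2:
--         return True
--     return len(set(lijst)) == len(lijst) and lijst[-1] - lijst[0] == len(lijst) - 1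
-- ===== Notes on version B (the rewrite author's own statement) =====
-- stated objective: simpler
-- what changed: Replaces the adjacent-pair scan loop with a closed-form test on the sorted list: all elements distinct and max - min equals len - 1.
import Mathlib
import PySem

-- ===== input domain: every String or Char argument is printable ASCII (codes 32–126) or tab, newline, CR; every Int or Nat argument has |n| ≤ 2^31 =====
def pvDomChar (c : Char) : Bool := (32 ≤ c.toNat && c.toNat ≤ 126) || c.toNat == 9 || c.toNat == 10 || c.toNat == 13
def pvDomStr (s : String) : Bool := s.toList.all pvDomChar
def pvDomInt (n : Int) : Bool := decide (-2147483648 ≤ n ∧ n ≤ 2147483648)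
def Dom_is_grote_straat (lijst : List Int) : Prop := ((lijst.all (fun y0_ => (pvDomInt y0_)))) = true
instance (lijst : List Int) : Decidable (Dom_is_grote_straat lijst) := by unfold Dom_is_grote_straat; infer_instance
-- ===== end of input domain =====

-- B replaces A's adjacent-pair scan with a closed-form distinctness + span test on the
-- sorted list (objective: simpler). Both Pythons sort `lijst` in place; the theorems here
-- are about the RETURN value (the mutation is identical in A and B).

-- ===== PORT A =====
-- the 'for i in range(1, len(lijst))' loop with its break, as structural recursion on i
def pvALoop (s : List Int) (i : Nat) : Bool :=
  if h : i < s.length then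
    let onderzoek := s[i]
    if onderzoek == s.getD (i - 1) 0 + 1 then pvALoop s (i + 1) else false
  else true
termination_by s.length - i

def is_grote_straat (lijst : List Int) : Bool :=
  let s := PySem.List.sorted lijst (fun x => x) false
  pvALoop s 1

-- ===== PORT B =====
def is_grote_straat_alt (lijst : List Int) : Bool :=
  let s := PySem.List.sorted lijst (fun x => x) false
  if s.length < 2 then true
  else decide ((PySem.Set.ofList s).length = s.length) &&
       decide (PySem.List.pyGetD s (-1) 0 - PySem.List.pyGetD s 0 0 = (s.length : Int) - 1)

-- ===== PRECONDITION & SPEC =====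
def Spec_is_grote_straat (lijst : List Int) (out : Bool) : Prop := out = is_grote_straat_alt lijst
instance (lijst : List Int) (out : Bool) : Decidable (Spec_is_grote_straat lijst out) := by unfold Spec_is_grote_straat; infer_instance

-- ===== CLAIM (what is proved, stated in full; the proofs are below) =====
def Claim_equal_is_grote_straat : Prop := ∀ (lijst : List Int), Dom_is_grote_straat lijst → Spec_is_grote_straat lijst (is_grote_straat lijst)

-- ===== LEMMAS AND PROOFS =====

lemma pvALoop_eq_true_iff (s : List Int) (i : Nat) :
    pvALoop s i = true ↔ ∀ j, i ≤ j → (hj : j < s.length) → s[j] = s.getD (j - 1) 0 + 1 := by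
  fun_induction pvALoop s i with
  | case1 i h onderzoek heq ih =>
    rw [ih]
    constructor
    · intro H j hij hj
      rcases Nat.eq_or_lt_of_le hij with rfl | h'
      · simpa using heq
      · exact H j h' hj
    · intro H j hij hj
      exact H j (by omega) hj
  | case2 i h onderzoek heq =>
    constructor
    · intro H; exact absurd H (by simp)
    · intro H
      exact (heq (beq_iff_eq.mpr (H i le_rfl h))).elim
  | case3 i h =>
    simp only [true_iff]
    intro j hij hj
    omega

lemma chain_lower (s : List Int)
    (step : ∀ j, (hj : j + 1 < s.length) → s[j] + 1 ≤ s[j + 1]) :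
    ∀ k (hk : k < s.length) j (hjk : j ≤ k), s[j]'(by omega) + (k - j : Nat) ≤ s[k] := by
  intro k
  induction k with
  | zero => intro hk j hjk; interval_cases j; simp
  | succ k ih =>
    intro hk j hjk
    rcases Nat.eq_or_lt_of_le hjk with rfl | h'
    · simp
    · have h1 := ih (by omega) j (by omega)
      have h2 := step k hk
      have : ((k + 1 - j : Nat) : Int) = (k - j : Nat) + 1 := by omega
      rw [this]; omega

lemma chain_exact (s : List Int)
    (step : ∀ j, (hj : j + 1 < s.length) → s[j + 1] = s[j] + 1) :
    ∀ k (hk : k < s.length), s[k] = s[0]'(by omega) + (k : Nat) := by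
  intro k
  induction k with
  | zero => simp
  | succ k ih =>
    intro hk
    rw [step k hk, ih (by omega)]
    push_cast; ring

lemma foldl_add_split {α : Type} [BEq α] (xs : List α) :
    ∀ acc : List α, ∃ ys, xs.foldl PySem.Set.add acc = acc ++ ys ∧ ys.Sublist xs := by
  induction xs with
  | nil => intro acc; exact ⟨[], by simp⟩
  | cons x xs ih =>
    intro acc
    obtain ⟨ys, h1, h2⟩ := ih (PySem.Set.add acc x)
    simp only [List.foldl_cons, h1]
    by_cases hc : acc.contains x
    · exact ⟨ys, by simp [PySem.Set.add, hc], h2.cons x⟩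
    · exact ⟨x :: ys, by simp [PySem.Set.add, hc], h2.cons₂ x⟩

lemma ofList_sublist {α : Type} [BEq α] (xs : List α) :
    (PySem.Set.ofList xs).Sublist xs := by
  obtain ⟨ys, h1, h2⟩ := foldl_add_split xs []
  rw [PySem.Set.ofList_eq_foldl, h1]; simpa using h2

lemma length_ofList_eq_iff {α : Type} [BEq α] [LawfulBEq α] (xs : List α) :
    (PySem.Set.ofList xs).length = xs.length ↔ xs.Nodup := by
  constructor
  · intro h
    have e := (ofList_sublist xs).eq_of_length h
    rw [← e]; exact PySem.Set.nodup_ofList xs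
  · intro h; rw [PySem.Set.ofList_eq_self_of_nodup xs h]

lemma core (s : List Int) (hs : s.Pairwise (· ≤ ·)) :
    pvALoop s 1 =
      (if s.length < 2 then true
       else decide ((PySem.Set.ofList s).length = s.length) &&
            decide (PySem.List.pyGetD s (-1) 0 - PySem.List.pyGetD s 0 0 = (s.length : Int) - 1)) := by
  by_cases hn : s.length < 2
  · rw [if_pos hn, pvALoop]
    simp only [dif_neg (by omega : ¬ 1 < s.length)]
  · rw [if_neg hn]
    have hlen : 2 ≤ s.length := by omega
    have hne : s ≠ [] := by intro e; simp [e] at hlen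
    have hm1 : PySem.List.pyGetD s (-1) 0 = s[s.length - 1]'(by omega) := by
      rw [PySem.List.pyGetD_neg_ofNat s 1 0 (by omega) (by omega)]
    have h0 : PySem.List.pyGetD s 0 0 = s[0]'(by omega) := by
      rw [PySem.List.pyGetD_zero, List.getD_eq_getElem s 0 (by omega)]
    have hmono : ∀ p q, (hpq : p ≤ q) → (hq : q < s.length) → s[p]'(by omega) ≤ s[q] := by
      intro p q hpq hq
      rcases Nat.eq_or_lt_of_le hpq with rfl | h'
      · exact le_refl _
      · exact (List.pairwise_iff_getElem.mp hs) p q (by omega) hq h'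
    rw [Bool.eq_iff_iff, pvALoop_eq_true_iff]
    simp only [Bool.and_eq_true, decide_eq_true_eq]
    constructor
    · intro C
      have step : ∀ j, (hj : j + 1 < s.length) → s[j + 1] = s[j] + 1 := by
        intro j hj
        have := C (j + 1) (by omega) hj
        rwa [Nat.add_sub_cancel, List.getD_eq_getElem s 0 (by omega : j < s.length)] at this
      have hex := chain_exact s step
      have hnd : s.Nodup := by
        apply List.Pairwise.imp (fun {a b} (h : a < b) => ne_of_lt h)
        apply List.pairwise_iff_getElem.mpr
        intro p q hp hq hpq
        rw [hex p (by omega), hex q hq]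
        have : (p : Int) < q := by exact_mod_cast hpq
        omega
      refine ⟨(length_ofList_eq_iff s).mpr hnd, ?_⟩
      rw [hm1, h0, hex (s.length - 1) (by omega)]
      have : ((s.length - 1 : Nat) : Int) = (s.length : Int) - 1 := by omega
      rw [this]; omega
    · rintro ⟨hl, hspan⟩
      have hnd : s.Nodup := (length_ofList_eq_iff s).mp hl
      have step' : ∀ j, (hj : j + 1 < s.length) → s[j] + 1 ≤ s[j + 1] := by
        intro j hj
        have hle := hmono j (j + 1) (by omega) hj
        have hne' : s[j]'(by omega) ≠ s[j + 1] := by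
          intro e
          have := (List.Nodup.getElem_inj_iff hnd).mp e
          omega
        omega
      have hcl := chain_lower s step'
      rw [hm1, h0] at hspan
      intro j hj1 hj
      rw [List.getD_eq_getElem s 0 (by omega : j - 1 < s.length)]
      by_contra hne2
      have A3 : s[j - 1]'(by omega) + 2 ≤ s[j] := by
        have := step' (j - 1) (by omega)
        simp only [Nat.sub_add_cancel hj1] at this
        have h2' : s[j - 1]'(by omega) + 1 ≠ s[j] := fun e => hne2 (by omega)
        omega
      have A1 := hcl (j - 1) (by omega) 0 (by omega)
      have A2 := hcl (s.length - 1) (by omega) j (by omega)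
      have c1 : ((j - 1 - 0 : Nat) : Int) = (j : Int) - 1 := by omega
      have c2 : ((s.length - 1 - j : Nat) : Int) = (s.length : Int) - 1 - j := by omega
      rw [c1] at A1
      rw [c2] at A2
      omega

-- ===== VERDICT (by name: the statement is the Claim_ definition above) =====
theorem is_grote_straat_spec : Claim_equal_is_grote_straat := by
  intro lijst _
  unfold Spec_is_grote_straat is_grote_straat is_grote_straat_alt
  exact core _ (PySem.List.sorted_pairwise lijst (fun x => x))
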